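-- pv_equiv track=rewrite | github.com/NatLibFi/aleph-conf-parser | parse-conf.py | parse_empty
-- ===== SOURCE A (Python) =====
-- def parse_empty(blocks):
--     my_data = []
--     my_empty = []
--     current_index = 0
--     for i in blocks:
--         end = current_index + int(i[0])
--         my_data.append((current_index, end))
--         current_index += i[0] + i[1]
--     for i in range(len(my_data) - 1):
--         my_empty.append((my_data[i][1], my_data[i+1][0]))
--     return my_empty
-- ===== SOURCE B (Python) =====
-- def parse_empty(blocks):
--     my_empty = []
--     current_index = 0
--     for idx, i in enumerate(blocks):
--         if idx < len(blocks) - 1: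
--             my_empty.append((current_index + i[0], current_index + i[0] + i[1]))
--         current_index += i[0] + i[1]
--     return my_empty
-- ===== Notes on version B (the rewrite author's own statement) =====
-- stated objective: simpler
-- what changed: Single pass over enumerate(blocks) emitting each gap directly (skipping the last block), eliminating the intermediate my_data list and the second index loop.
import Mathlib
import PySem

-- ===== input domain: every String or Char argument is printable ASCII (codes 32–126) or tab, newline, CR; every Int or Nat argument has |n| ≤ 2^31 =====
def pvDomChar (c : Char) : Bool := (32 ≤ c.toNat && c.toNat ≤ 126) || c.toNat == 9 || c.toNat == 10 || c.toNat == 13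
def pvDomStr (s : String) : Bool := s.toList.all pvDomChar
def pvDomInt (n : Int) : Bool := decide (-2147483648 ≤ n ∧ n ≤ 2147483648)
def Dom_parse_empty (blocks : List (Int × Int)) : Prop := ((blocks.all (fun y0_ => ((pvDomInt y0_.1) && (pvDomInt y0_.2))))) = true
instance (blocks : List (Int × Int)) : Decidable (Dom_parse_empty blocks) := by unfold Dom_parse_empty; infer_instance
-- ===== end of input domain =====

-- B replaces A's two passes (build my_data, then zip over consecutive index pairs) by a
-- single pass over enumerate(blocks) that emits each gap directly, skipping the last block.

-- ===== PORT A =====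
def parse_empty (blocks : List (Int × Int)) : List (Int × Int) :=
  -- first loop: my_data and current_index carried as a pair
  let st := blocks.foldl
    (fun (acc : List (Int × Int) × Int) i =>
      (acc.1 ++ [(acc.2, acc.2 + i.1)], acc.2 + i.1 + i.2)) ([], 0)
  -- second loop: for i in range(len(my_data) - 1)
  (PySem.List.pyRange 0 ((st.1.length : Int) - 1) 1).foldl
    (fun acc i =>
      acc ++ [((PySem.List.pyGetD st.1 i ((0:Int), (0:Int))).2,
               (PySem.List.pyGetD st.1 (i + 1) ((0:Int), (0:Int))).1)]) []

-- ===== PORT B =====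
def parse_empty_alt (blocks : List (Int × Int)) : List (Int × Int) :=
  ((PySem.List.enumerate blocks 0).foldl
    (fun (st : List (Int × Int) × Int) p =>
      ((if p.1 < (blocks.length : Int) - 1
          then st.1 ++ [(st.2 + p.2.1, st.2 + p.2.1 + p.2.2)]
          else st.1),
       st.2 + p.2.1 + p.2.2)) ([], 0)).1

-- ===== PRECONDITION & SPEC =====
def Spec_parse_empty (blocks : List (Int × Int)) (out : List (Int × Int)) : Prop := out = parse_empty_alt blocks
instance (blocks : List (Int × Int)) (out : List (Int × Int)) : Decidable (Spec_parse_empty blocks out) := by unfold Spec_parse_empty; infer_instance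

-- ===== CLAIM (what is proved, stated in full; the proofs are below) =====
def Claim_equal_parse_empty : Prop := ∀ (blocks : List (Int × Int)), Dom_parse_empty blocks → Spec_parse_empty blocks (parse_empty blocks)

-- ===== LEMMAS AND PROOFS =====

-- the my_data list A's first loop builds when started at current_index = cur
def pvDataList (cur : Int) : List (Int × Int) → List (Int × Int)
  | [] => []
  | (a, b) :: t => (cur, cur + a) :: pvDataList (cur + a + b) t

-- the gap list both programs compute when the running index starts at cur
def pvGaps (cur : Int) : List (Int × Int) → List (Int × Int)
  | [] => []
  | [_] => []
  | (a, b) :: t => (cur + a, cur + a + b) :: pvGaps (cur + a + b) t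

-- A's first loop produces acc ++ pvDataList cur blocks
lemma parse_empty_loop1 (l : List (Int × Int)) (acc : List (Int × Int)) (cur : Int) :
    (l.foldl (fun (st : List (Int × Int) × Int) i =>
        (st.1 ++ [(st.2, st.2 + i.1)], st.2 + i.1 + i.2)) (acc, cur)).1
      = acc ++ pvDataList cur l := by
  induction l generalizing acc cur with
  | nil => simp [pvDataList]
  | cons h t ih => cases h with
    | mk a b => simp [List.foldl_cons, ih, pvDataList]

-- the adjacent pairs (end of i-th interval, start of (i+1)-th) of a data list
def pvAdj : List (Int × Int) → List (Int × Int)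
  | [] => []
  | [_] => []
  | x :: y :: t => (x.2, y.1) :: pvAdj (y :: t)

-- auxiliary: the indexed map over a nonempty list reads off its adjacent pairs
lemma range_map_getD_adj (x : Int × Int) (t : List (Int × Int)) :
    (List.range t.length).map
      (fun k => (((x :: t).getD k ((0:Int),(0:Int))).2, ((x :: t).getD (k+1) ((0:Int),(0:Int))).1))
      = pvAdj (x :: t) := by
  induction t generalizing x with
  | nil => simp [pvAdj]
  | cons y t ih =>
    rw [List.length_cons, List.range_succ_eq_map]
    simp only [List.map_cons, List.map_map, List.getD_cons_succ, List.getD_cons_zero]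
    rw [pvAdj]
    exact congrArg _ (ih y)

-- A's second loop over a data list L equals adjacent-interval gaps read off L directly
lemma parse_empty_loop2 (L : List (Int × Int)) :
    (PySem.List.pyRange 0 ((L.length : Int) - 1) 1).foldl
      (fun acc i =>
        acc ++ [((PySem.List.pyGetD L i ((0:Int), (0:Int))).2,
                 (PySem.List.pyGetD L (i + 1) ((0:Int), (0:Int))).1)]) []
      = pvAdj L := by
  rw [PySem.List.foldl_append_singleton_eq_map]
  match L with
  | [] => simp [PySem.List.pyRange_one_eq_nil, pvAdj]
  | x :: t =>
    have hone : ((x :: t).length : Int) - 1 = ((t.length : Nat) : Int) := by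
      simp
    rw [hone, PySem.List.pyRange_zero_nat, List.map_map]
    rw [← range_map_getD_adj x t]
    refine List.map_congr_left (fun k _ => ?_)
    have h1 : ((k : Int) + 1) = ((k + 1 : Nat) : Int) := by push_cast; ring
    simp only [Function.comp_apply, h1, PySem.List.pyGetD_natCast]

-- B's loop: with total length N and s + t.length = N, it emits pvGaps cur t
lemma parse_empty_alt_loop (N : Int) (t : List (Int × Int)) (s cur : Int)
    (acc : List (Int × Int)) (hs : s + (t.length : Int) = N) :
    ((PySem.List.enumerate t s).foldl
      (fun (st : List (Int × Int) × Int) p =>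
        ((if p.1 < N - 1
            then st.1 ++ [(st.2 + p.2.1, st.2 + p.2.1 + p.2.2)]
            else st.1),
         st.2 + p.2.1 + p.2.2)) (acc, cur)).1
      = acc ++ pvGaps cur t := by
  induction t generalizing s cur acc with
  | nil => simp [PySem.List.enumerate_nil, pvGaps]
  | cons h t ih =>
    obtain ⟨a, b⟩ := h
    rw [PySem.List.enumerate_cons]
    simp only [List.foldl_cons]
    cases t with
    | nil =>
      have hc : ¬ (s < N - 1) := by simp at hs; omega
      simp [hc, PySem.List.enumerate_nil, pvGaps]
    | cons y t' =>
      have hc : s < N - 1 := by simp at hs; omega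
      have hs' : (s + 1) + (((y :: t').length : Nat) : Int) = N := by
        simp at hs ⊢; omega
      simp only [hc, if_pos]
      rw [ih (s+1) (cur + a + b) _ hs']
      simp [pvGaps, List.append_assoc]

-- the gaps are exactly the adjacent pairs of the data list
lemma pvAdj_dataList (cur : Int) (l : List (Int × Int)) :
    pvAdj (pvDataList cur l) = pvGaps cur l := by
  induction l generalizing cur with
  | nil => rfl
  | cons h t ih =>
    obtain ⟨a, b⟩ := h
    cases t with
    | nil => rfl
    | cons y t' =>
      obtain ⟨c, d⟩ := y
      simp only [pvDataList, pvAdj, pvGaps]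
      exact congrArg _ (ih (cur + a + b))

-- ===== VERDICT (by name: the statement is the Claim_ definition above) =====
theorem parse_empty_spec : Claim_equal_parse_empty := by
  intro blocks _
  unfold Spec_parse_empty
  simp only [parse_empty, parse_empty_alt]
  rw [parse_empty_loop1, List.nil_append, parse_empty_loop2,
      parse_empty_alt_loop (blocks.length : Int) blocks 0 0 [] (by simp),
      List.nil_append, pvAdj_dataList]
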